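-- pv_equiv track=rewrite | github.com/odolan-gradient/SlackBot | Logger.py | get_sensor_port_indexes
-- ===== SOURCE A (Python) =====
-- def get_sensor_port_indexes(ports):
--     ir_port = None
--     vp4_port = None
--     vwc1_port = None
--     vwc2_port = None
--     vwc3_port = None
--     switch_port = None
--     vwc_ports = []
--     # Offset to account for Zentra data return having a timestamp in index 0, mrid in index 1,
--     # and 1 extra value in index 2. Actual sensors don't start until index 3. Using an offset of 2
--     # since the port data starts at 1 already, not from 0. So 1 + 2 = 3 as the first sensor data index.
--     data_index_offset = 2
--     for key in ports:
--         value = ports[key]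
--         if ir_port is None and value == 'Infra Red':
--             ir_port = key + data_index_offset
--         elif vp4_port is None and value in ['VP4', 'Atmos 14']:
--             vp4_port = key + data_index_offset
--         elif value in ['GS1', 'GS3', 'Terros 10', 'Terros 12']:
--             vwc_ports.append(key)
--         elif switch_port is None and value == 'Switch':
--             switch_port = key + data_index_offset
--
--     # VWC ports grabbed after in a sorted list to ensure we assign them in the correct order. The first port with
--     # a VWC sensor will be vwc1_port, the second will be vwc2_port, and so on until we have 3 ports for VWCs
--     for key in sorted(vwc_ports):
--         if vwc1_port is None:
--             vwc1_port = key + data_index_offset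
--         elif vwc2_port is None:
--             vwc2_port = key + data_index_offset
--         elif vwc3_port is None:
--             vwc3_port = key + data_index_offset
--
--     return data_index_offset, ir_port, vp4_port, vwc1_port, vwc2_port, vwc3_port, switch_port
-- ===== SOURCE B (Python) =====
-- def get_sensor_port_indexes(ports):
--     # Staged independent scans per category instead of one classification pass:
--     # the sensor-name sets are disjoint, so first-match-per-category equals A's elif chain.
--     OFF = 2
--
--     def first(names):
--         return next((k + OFF for k, v in ports.items() if v in names), None)
--
--     vwc = [k + OFF for k in sorted(k for k, v in ports.items()
--                                    if v in ('GS1', 'GS3', 'Terros 10', 'Terros 12'))[:3]]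
--     vwc += [None] * (3 - len(vwc))
--     return (OFF, first(('Infra Red',)), first(('VP4', 'Atmos 14')),
--             vwc[0], vwc[1], vwc[2], first(('Switch',)))
-- ===== Notes on version B (the rewrite author's own statement) =====
-- stated objective: simpler
-- what changed: Replaces A's single classification loop with None-flag state and its second fill-in loop by independent staged scans: one first-match scan per category (ir/vp4/switch) and one comprehension+sort for the VWC keys, correct because the category name sets are disjoint.
import Mathlib
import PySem

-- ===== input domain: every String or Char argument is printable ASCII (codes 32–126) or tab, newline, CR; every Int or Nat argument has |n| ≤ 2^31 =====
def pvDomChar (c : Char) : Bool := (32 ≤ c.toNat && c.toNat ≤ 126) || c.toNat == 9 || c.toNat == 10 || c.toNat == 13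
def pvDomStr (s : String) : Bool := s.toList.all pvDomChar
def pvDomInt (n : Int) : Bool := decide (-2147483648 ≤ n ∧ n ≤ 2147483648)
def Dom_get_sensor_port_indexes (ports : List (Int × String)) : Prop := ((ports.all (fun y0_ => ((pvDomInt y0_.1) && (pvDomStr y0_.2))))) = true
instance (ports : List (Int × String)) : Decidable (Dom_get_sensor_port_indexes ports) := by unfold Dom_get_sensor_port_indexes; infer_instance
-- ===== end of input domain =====

-- B replaces A's one classification loop (None-flag state machine + second fill-in loop)
-- by independent staged scans: a first-match scan per category and a sort of the
-- filtered VWC keys (objective: simpler).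


-- ===== PORT A =====
-- A's first loop: state machine over (ir_port, vp4_port, vwc_ports, switch_port).
def aLoop : List (Int × String) → Option Int → Option Int → List Int → Option Int →
    Option Int × Option Int × List Int × Option Int
  | [], ir, vp4, vwc, sw => (ir, vp4, vwc, sw)
  | (key, value) :: rest, ir, vp4, vwc, sw =>
    if ir = none ∧ value = "Infra Red" then
      aLoop rest (some (key + 2)) vp4 vwc sw
    else if vp4 = none ∧ (value = "VP4" ∨ value = "Atmos 14") then
      aLoop rest ir (some (key + 2)) vwc sw
    else if value = "GS1" ∨ value = "GS3" ∨ value = "Terros 10" ∨ value = "Terros 12" then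
      aLoop rest ir vp4 (vwc ++ [key]) sw
    else if sw = none ∧ value = "Switch" then
      aLoop rest ir vp4 vwc (some (key + 2))
    else
      aLoop rest ir vp4 vwc sw

-- A's second loop: fill vwc1/vwc2/vwc3 from the sorted vwc keys.
def vwcLoop : List Int → Option Int → Option Int → Option Int →
    Option Int × Option Int × Option Int
  | [], v1, v2, v3 => (v1, v2, v3)
  | k :: rest, v1, v2, v3 =>
    if v1 = none then vwcLoop rest (some (k + 2)) v2 v3
    else if v2 = none then vwcLoop rest v1 (some (k + 2)) v3
    else if v3 = none then vwcLoop rest v1 v2 (some (k + 2))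
    else vwcLoop rest v1 v2 v3

def get_sensor_port_indexes (ports : List (Int × String)) : Option Int × Option Int × Option Int × Option Int × Option Int × Option Int × Option Int :=
  -- the dict[int, str] argument: Python dict construction (first-occurrence order, last value wins)
  let items := (PySem.Dict.ofList ports).items
  let r := aLoop items none none [] none
  let v := vwcLoop (PySem.List.sorted r.2.2.1 (fun x => x) false) none none none
  (some 2, r.1, r.2.1, v.1, v.2.1, v.2.2, r.2.2.2)

-- ===== PORT B =====
-- first(names): next((k + OFF for k, v in ports.items() if v in names), None)
def bFirst (names : List String) (items : List (Int × String)) : Option Int :=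
  (items.find? (fun p => names.contains p.2)).map (fun p => p.1 + 2)

def get_sensor_port_indexes_alt (ports : List (Int × String)) : Option Int × Option Int × Option Int × Option Int × Option Int × Option Int × Option Int :=
  let items := (PySem.Dict.ofList ports).items
  -- sorted VWC keys, first three (+2), padded with None up to length 3
  let vwcSorted := PySem.List.sorted
      ((items.filter (fun p => ["GS1", "GS3", "Terros 10", "Terros 12"].contains p.2)).map (·.1))
      (fun x => x) false
  let vwc := ((PySem.List.slice vwcSorted none (some 3)).map (fun k => some (k + 2)))
      ++ List.replicate (3 - (PySem.List.slice vwcSorted none (some 3)).length) none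
  (some 2, bFirst ["Infra Red"] items, bFirst ["VP4", "Atmos 14"] items,
    vwc.getD 0 none, vwc.getD 1 none, vwc.getD 2 none, bFirst ["Switch"] items)

-- ===== PRECONDITION & SPEC =====
def Spec_get_sensor_port_indexes (ports : List (Int × String)) (out : Option Int × Option Int × Option Int × Option Int × Option Int × Option Int × Option Int) : Prop := out = get_sensor_port_indexes_alt ports
instance (ports : List (Int × String)) (out : Option Int × Option Int × Option Int × Option Int × Option Int × Option Int × Option Int) : Decidable (Spec_get_sensor_port_indexes ports out) := by
  unfold Spec_get_sensor_port_indexes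
  -- instance search does not chain 6 nested products by itself; give the term
  exact @instDecidableEqProd _ _ inferInstance (@instDecidableEqProd _ _ inferInstance (@instDecidableEqProd _ _ inferInstance (@instDecidableEqProd _ _ inferInstance (@instDecidableEqProd _ _ inferInstance (@instDecidableEqProd _ _ inferInstance inferInstance))))) _ _

-- ===== CLAIM (what is proved, stated in full; the proofs are below) =====
def Claim_equal_get_sensor_port_indexes : Prop := ∀ (ports : List (Int × String)), Dom_get_sensor_port_indexes ports → Spec_get_sensor_port_indexes ports (get_sensor_port_indexes ports)

-- ===== LEMMAS AND PROOFS =====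

-- canonical per-category key lists (Prop-predicate form, used to characterise A's loop)
def irKeys (l : List (Int × String)) : List Int := (l.filter (fun p => p.2 = "Infra Red")).map (·.1)
def vpKeys (l : List (Int × String)) : List Int := (l.filter (fun p => p.2 = "VP4" ∨ p.2 = "Atmos 14")).map (·.1)
def vwKeys (l : List (Int × String)) : List Int := (l.filter (fun p => p.2 = "GS1" ∨ p.2 = "GS3" ∨ p.2 = "Terros 10" ∨ p.2 = "Terros 12")).map (·.1)
def swKeys (l : List (Int × String)) : List Int := (l.filter (fun p => p.2 = "Switch")).map (·.1)

def keysOf (names : List String) (l : List (Int × String)) : List Int :=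
  (l.filter (fun p => names.contains p.2)).map (·.1)

def firstAdd (keys : List Int) : Option Int := keys.head?.map (· + 2)

lemma aLoop_spec (l : List (Int × String)) : ∀ ir vp4 vwc sw,
    aLoop l ir vp4 vwc sw =
      (ir.or (firstAdd (irKeys l)), vp4.or (firstAdd (vpKeys l)),
       vwc ++ vwKeys l, sw.or (firstAdd (swKeys l))) := by
  induction l with
  | nil => intro ir vp4 vwc sw; simp [aLoop, irKeys, vpKeys, vwKeys, swKeys, firstAdd]
  | cons p rest ih =>
    obtain ⟨key, value⟩ := p
    intro ir vp4 vwc sw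
    simp only [aLoop]
    split_ifs with h1 h2 h3 h4
    · obtain ⟨hi, hv⟩ := h1; subst hi; subst hv
      simp [ih, irKeys, vpKeys, vwKeys, swKeys, firstAdd, List.filter_cons]
    · obtain ⟨hp, hv⟩ := h2; subst hp
      rcases hv with hv | hv <;> subst hv <;>
        simp [ih, irKeys, vpKeys, vwKeys, swKeys, firstAdd, List.filter_cons]
    · rcases h3 with hv | hv | hv | hv <;> subst hv <;>
        simp [ih, irKeys, vpKeys, vwKeys, swKeys, firstAdd, List.filter_cons]
    · obtain ⟨hs, hv⟩ := h4; subst hs; subst hv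
      simp [ih, irKeys, vpKeys, vwKeys, swKeys, firstAdd, List.filter_cons]
    · -- no branch fires: every component is unchanged by this item
      have hir : ir.or (firstAdd (irKeys ((key, value) :: rest))) =
          ir.or (firstAdd (irKeys rest)) := by
        by_cases hv : value = "Infra Red"
        · obtain ⟨a, rfl⟩ := Option.ne_none_iff_exists'.mp (fun h => h1 ⟨h, hv⟩); simp
        · simp [irKeys, List.filter_cons, hv]
      have hvp : vp4.or (firstAdd (vpKeys ((key, value) :: rest))) =
          vp4.or (firstAdd (vpKeys rest)) := by
        by_cases hv : value = "VP4" ∨ value = "Atmos 14"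
        · obtain ⟨a, rfl⟩ := Option.ne_none_iff_exists'.mp (fun h => h2 ⟨h, hv⟩); simp
        · simp [vpKeys, List.filter_cons, hv]
      have hvw : vwKeys ((key, value) :: rest) = vwKeys rest := by
        simp [vwKeys, List.filter_cons, h3]
      have hsw : sw.or (firstAdd (swKeys ((key, value) :: rest))) =
          sw.or (firstAdd (swKeys rest)) := by
        by_cases hv : value = "Switch"
        · obtain ⟨a, rfl⟩ := Option.ne_none_iff_exists'.mp (fun h => h4 ⟨h, hv⟩); simp
        · simp [swKeys, List.filter_cons, hv]
      simp only [ih, hir, hvp, hvw, hsw]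

-- B's find?-based first-match scan equals head-of-filter
lemma bFirst_eq (names : List String) (l : List (Int × String)) :
    bFirst names l = firstAdd (keysOf names l) := by
  induction l with
  | nil => rfl
  | cons p rest ih =>
    cases h : names.contains p.2 <;>
      · simp only [bFirst, keysOf, firstAdd, List.find?_cons, List.filter_cons, h] <;>
        simpa [bFirst, keysOf, firstAdd] using ih

-- the contains-based predicates of B coincide with the equality predicates of A's characterisation
lemma keysOf_ir (l : List (Int × String)) : keysOf ["Infra Red"] l = irKeys l := by
  unfold keysOf irKeys; congr 1; apply List.filter_congr; intro x _; simp

lemma keysOf_vp (l : List (Int × String)) : keysOf ["VP4", "Atmos 14"] l = vpKeys l := by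
  unfold keysOf vpKeys; congr 1; apply List.filter_congr; intro x _; simp

lemma keysOf_vw (l : List (Int × String)) :
    keysOf ["GS1", "GS3", "Terros 10", "Terros 12"] l = vwKeys l := by
  unfold keysOf vwKeys; congr 1; apply List.filter_congr; intro x _; simp

lemma keysOf_sw (l : List (Int × String)) : keysOf ["Switch"] l = swKeys l := by
  unfold keysOf swKeys; congr 1; apply List.filter_congr; intro x _; simp

lemma slice3 (l : List Int) : PySem.List.slice l none (some 3) = l.take 3 := by
  simpa using PySem.List.slice_to l (b := 3) (by norm_num)

lemma vwcLoop_full (s : List Int) (x y z : Int) :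
    vwcLoop s (some x) (some y) (some z) = (some x, some y, some z) := by
  induction s with
  | nil => rfl
  | cons k rest ih => simp [vwcLoop, ih]

lemma vwcLoop_none (s : List Int) :
    vwcLoop s none none none =
      (((s.take 3).map (fun k => some (k + 2)) ++ List.replicate (3 - (s.take 3).length) none).getD 0 none,
       ((s.take 3).map (fun k => some (k + 2)) ++ List.replicate (3 - (s.take 3).length) none).getD 1 none,
       ((s.take 3).map (fun k => some (k + 2)) ++ List.replicate (3 - (s.take 3).length) none).getD 2 none) := by
  match s with
  | [] => rfl
  | [a] => rfl
  | [a, b] => rfl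
  | a :: b :: c :: rest => simp [vwcLoop, vwcLoop_full]

-- ===== VERDICT (by name: the statement is the Claim_ definition above) =====
theorem get_sensor_port_indexes_spec : Claim_equal_get_sensor_port_indexes := by
  intro ports _
  unfold Spec_get_sensor_port_indexes get_sensor_port_indexes get_sensor_port_indexes_alt
  simp only [aLoop_spec, Option.none_or, List.nil_append, vwcLoop_none, bFirst_eq,
    keysOf_ir, keysOf_vp, keysOf_sw, slice3]
  simp only [← keysOf_vw, keysOf]
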